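-- pv_equiv track=rewrite | github.com/Chiro2002/SEM_5_SE | python_and_bash/leap year.py | generate_leap_years
-- ===== SOURCE A (Python) =====
-- def is_leap_year(year):
--     if (year % 4 == 0 and year % 100 != 0) or (year % 400 == 0):
--         return True
--     return False
--
-- def generate_leap_years(start_year, count):
--     leap_years = []
--     year = start_year
--
--     while len(leap_years) < count:
--         if is_leap_year(year):
--             leap_years.append(year)
--         year += 1
--
--     return leap_years
-- ===== SOURCE B (Python) =====
-- def is_leap_year(year):
--     return (year % 4 == 0 and year % 100 != 0) or (year % 400 == 0)
--
-- def next_leap(year):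
--     # smallest leap year >= year: jump to the next multiple of 4, then step by 4
--     y = year + (-year) % 4
--     while not is_leap_year(y):
--         y += 4
--     return y
--
-- def generate_leap_years(start_year, count):
--     result = []
--     year = start_year
--     for _ in range(count):
--         year = next_leap(year)
--         result.append(year)
--         year += 1
--     return result
-- ===== Notes on version B (the rewrite author's own statement) =====
-- stated objective: faster
-- what changed: B is count-driven: a for-loop over range(count) repeatedly calls a next_leap helper that jumps directly to the next multiple of 4 and steps by 4, instead of A's while-loop scanning every single year and checking the accumulated length.
import Mathlib
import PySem

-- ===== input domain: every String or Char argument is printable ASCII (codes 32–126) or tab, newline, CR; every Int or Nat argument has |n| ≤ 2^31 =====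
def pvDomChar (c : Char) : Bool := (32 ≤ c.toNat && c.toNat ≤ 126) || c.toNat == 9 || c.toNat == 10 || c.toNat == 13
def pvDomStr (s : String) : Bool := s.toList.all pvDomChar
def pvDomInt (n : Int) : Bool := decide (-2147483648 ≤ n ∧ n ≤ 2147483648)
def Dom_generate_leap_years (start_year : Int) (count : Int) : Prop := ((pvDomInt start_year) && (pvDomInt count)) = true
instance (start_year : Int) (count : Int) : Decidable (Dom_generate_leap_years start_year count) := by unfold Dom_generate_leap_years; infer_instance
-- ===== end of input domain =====

-- B is count-driven: for each of the count outputs it jumps with a next_leap helper straight to the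
-- next multiple of 4 (stepping by 4 past non-leap centuries), instead of A's year-by-year while scan;
-- same return value, a constant-factor speedup.

-- ===== PORT A =====
def pvIsLeap (year : Int) : Bool :=
  (PySem.Int.mod year 4 == 0 && PySem.Int.mod year 100 != 0) || PySem.Int.mod year 400 == 0

-- A's while-loop, one year per step; the list is accumulated in reverse (cons, reversed at the
-- end) and k carries len(leap_years), which Python reads in O(1). Fuel is a totality device
-- only: every window of 8 consecutive years contains a leap year, so 8*count+8 steps suffice.
def pvLoopA (count : Int) : Nat → Int → Nat → List Int → List Int
  | 0, _, _, acc => acc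
  | f+1, year, k, acc =>
    if (k : Int) < count then
      if pvIsLeap year then pvLoopA count f (year + 1) (k + 1) (year :: acc)
      else pvLoopA count f (year + 1) k acc
    else acc

def generate_leap_years (start_year : Int) (count : Int) : List Int :=
  (pvLoopA count (8 * count.toNat + 8) start_year 0 []).reverse

-- ===== PORT B =====
-- next_leap's inner while, one multiple of 4 per step; fuel 2 always suffices (two
-- consecutive multiples of 4 are never both non-leap).
def pvNextLoop : Nat → Int → Int
  | 0, y => y
  | f+1, y => if pvIsLeap y then y else pvNextLoop f (y + 4)

def pvNextLeap (year : Int) : Int :=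
  pvNextLoop 2 (year + PySem.Int.mod (-year) 4)

-- B's for-loop over range(count): structural recursion on the count, accumulating in reverse.
def pvGenLoop : Nat → Int → List Int → List Int
  | 0, _, acc => acc
  | n+1, year, acc =>
    let z := pvNextLeap year
    pvGenLoop n (z + 1) (z :: acc)

def generate_leap_years_alt (start_year : Int) (count : Int) : List Int :=
  (pvGenLoop count.toNat start_year []).reverse

-- ===== PRECONDITION & SPEC =====
def Spec_generate_leap_years (start_year : Int) (count : Int) (out : List Int) : Prop := out = generate_leap_years_alt start_year count
instance (start_year : Int) (count : Int) (out : List Int) : Decidable (Spec_generate_leap_years start_year count out) := by unfold Spec_generate_leap_years; infer_instance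

-- ===== CLAIM (what is proved, stated in full; the proofs are below) =====
def Claim_equal_generate_leap_years : Prop := ∀ (start_year : Int) (count : Int), Dom_generate_leap_years start_year count → Spec_generate_leap_years start_year count (generate_leap_years start_year count)

-- ===== LEMMAS AND PROOFS =====

-- proof-side specification: the forward list of the next n leap years from y
def pvSpecGen : Nat → Int → List Int
  | 0, _ => []
  | n+1, y => pvNextLeap y :: pvSpecGen n (pvNextLeap y + 1)

lemma pvLeap_iff (y : Int) : pvIsLeap y = true ↔ ((y % 4 = 0 ∧ y % 100 ≠ 0) ∨ y % 400 = 0) := by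
  unfold pvIsLeap
  rw [PySem.Int.mod_eq_emod_of_pos (show (0:Int) < 4 by norm_num),
      PySem.Int.mod_eq_emod_of_pos (show (0:Int) < 100 by norm_num),
      PySem.Int.mod_eq_emod_of_pos (show (0:Int) < 400 by norm_num)]
  simp

lemma pvLeap_false (y : Int) (h : ¬ ((y % 4 = 0 ∧ y % 100 ≠ 0) ∨ y % 400 = 0)) :
    pvIsLeap y = false := by
  cases hb : pvIsLeap y
  · rfl
  · exact absurd ((pvLeap_iff y).mp hb) h

lemma pvLeap_false_mod4 (y : Int) (h : y % 4 ≠ 0) : pvIsLeap y = false :=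
  pvLeap_false y (by omega)

-- pvNextLeap y is a leap year in [y, y+7] and everything strictly below it (from y) is non-leap
lemma nextLeap_spec (y : Int) :
    y ≤ pvNextLeap y ∧ pvNextLeap y ≤ y + 7 ∧ pvIsLeap (pvNextLeap y) = true ∧
      ∀ j : Int, y ≤ j → j < pvNextLeap y → pvIsLeap j = false := by
  unfold pvNextLeap
  set r := PySem.Int.mod (-y) 4 with hrdef
  have hrE : r = (-y) % 4 := by
    rw [hrdef, PySem.Int.mod_eq_emod_of_pos (show (0:Int) < 4 by norm_num)]
  have hr : 0 ≤ r ∧ r < 4 ∧ (y + r) % 4 = 0 := by omega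
  by_cases h0 : pvIsLeap (y + r) = true
  · have : pvNextLoop 2 (y + r) = y + r := by simp [pvNextLoop, h0]
    rw [this]
    refine ⟨by omega, by omega, h0, fun j hj1 hj2 => pvLeap_false_mod4 j (by omega)⟩
  · have h0' : pvIsLeap (y + r) = false := by
      cases hb : pvIsLeap (y + r)
      · rfl
      · exact absurd hb h0
    have hcent : (y + r) % 100 = 0 ∧ (y + r) % 400 ≠ 0 := by
      by_contra hc
      exact h0 ((pvLeap_iff (y + r)).mpr (by omega))
    have h4 : pvIsLeap (y + r + 4) = true := by
      rw [pvLeap_iff]; omega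
    have : pvNextLoop 2 (y + r) = y + r + 4 := by simp [pvNextLoop, h0', h4]
    rw [this]
    refine ⟨by omega, by omega, h4, fun j hj1 hj2 => ?_⟩
    by_cases hj : j = y + r
    · rw [hj]; exact h0'
    · exact pvLeap_false_mod4 j (by omega)

-- B's loop accumulates pvSpecGen in reverse
lemma genLoop_eq : ∀ (n : Nat) (y : Int) (acc : List Int),
    pvGenLoop n y acc = (pvSpecGen n y).reverse ++ acc := by
  intro n
  induction n with
  | zero => intro y acc; simp [pvGenLoop, pvSpecGen]
  | succ n ih =>
    intro y acc
    simp [pvGenLoop, pvSpecGen, ih, List.append_assoc]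

lemma loopA_stop (c : Int) (f : Nat) (y : Int) (k : Nat) (acc : List Int)
    (h : ¬ ((k : Int) < c)) : pvLoopA c f y k acc = acc := by
  cases f with
  | zero => rfl
  | succ f => simp [pvLoopA, h]

lemma skipA (c : Int) (f : Nat) (y : Int) (k : Nat) (acc : List Int) (h : pvIsLeap y = false) :
    pvLoopA c (f + 1) y k acc = pvLoopA c f (y + 1) k acc := by
  by_cases hlt : ((k : Int) < c)
  · simp [pvLoopA, hlt, h]
  · rw [loopA_stop c (f+1) y k acc hlt, loopA_stop c f (y+1) k acc hlt]

-- skip a whole block of non-leap years at once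
lemma advA (c : Int) : ∀ (m f : Nat) (y : Int) (k : Nat) (acc : List Int),
    (∀ j : Int, y ≤ j → j < y + m → pvIsLeap j = false) →
    pvLoopA c (m + f) y k acc = pvLoopA c f (y + m) k acc := by
  intro m
  induction m with
  | zero => intro f y k acc _; norm_num
  | succ m ih =>
    intro f y k acc h
    have h0 : pvIsLeap y = false := h y le_rfl (by push_cast; omega)
    have hm : m + 1 + f = (m + f) + 1 := by omega
    rw [hm, skipA c (m + f) y k acc h0,
      ih f (y + 1) k acc (fun j hj1 hj2 => h j (by omega) (by push_cast at hj2 ⊢; omega))]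
    congr 1
    push_cast
    ring

-- main invariant: with n slots left and enough fuel, A's loop prepends pvSpecGen n y reversed
lemma mainA (c : Int) : ∀ (n : Nat) (f : Nat) (y : Int) (k : Nat) (acc : List Int),
    (k : Int) + n = c → 8 * n ≤ f →
    pvLoopA c f y k acc = (pvSpecGen n y).reverse ++ acc := by
  intro n
  induction n with
  | zero =>
    intro f y k acc hlen _
    rw [loopA_stop c f y k acc (by omega)]
    simp [pvSpecGen]
  | succ n ih =>
    intro f y k acc hlen hf
    have hlt : (k : Int) < c := by push_cast at hlen; omega
    obtain ⟨hz1, hz2, hz3, hz4⟩ := nextLeap_spec y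
    set z := pvNextLeap y with hzdef
    set d : Nat := (z - y).toNat with hddef
    have hdz : y + (d : Int) = z := by omega
    have hd7 : d ≤ 7 := by omega
    have hsplit : f = d + ((f - d - 1) + 1) := by omega
    rw [hsplit, advA c d ((f - d - 1) + 1) y k acc
      (fun j hj1 hj2 => hz4 j hj1 (by omega)), hdz]
    have hstep : pvLoopA c ((f - d - 1) + 1) z k acc
        = pvLoopA c (f - d - 1) (z + 1) (k + 1) (z :: acc) := by
      simp [pvLoopA, hlt, hz3]
    rw [hstep, ih (f - d - 1) (z + 1) (k + 1) (z :: acc) (by push_cast at hlen ⊢; omega) (by omega)]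
    simp [pvSpecGen, ← hzdef, List.append_assoc]

-- ===== VERDICT (by name: the statement is the Claim_ definition above) =====
theorem generate_leap_years_spec : Claim_equal_generate_leap_years := by
  intro s c _
  unfold Spec_generate_leap_years generate_leap_years generate_leap_years_alt
  rw [genLoop_eq c.toNat s []]
  by_cases hc : 0 < c
  · rw [mainA c c.toNat (8 * c.toNat + 8) s 0 [] (by push_cast; omega) (by omega)]
  · have hc0 : c.toNat = 0 := by omega
    rw [hc0, loopA_stop c _ s 0 [] (by simpa using hc)]
    simp [pvSpecGen]
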